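-- pv_equiv track=rewrite | github.com/adnohpamer/Il2CppDumper | script/struct_gen.py | strip_modifiers
-- ===== SOURCE A (Python) =====
-- MODIFIERS = {
--     "public",
--     "private",
--     "protected",
--     "internal",
--     "static",
--     "readonly",
--     "volatile",
--     "unsafe",
--     "const",
--     "new",
--     "sealed",
--     "abstract",
--     "extern",
--     "partial",
--     "fixed",
-- }
--
-- def strip_modifiers(declaration: str) -> str:
--     remaining = declaration.strip()
--     while True:
--         parts = remaining.split(None, 1)
--         if parts and parts[0] in MODIFIERS:
--             if len(parts) == 1:
--                 return ""
--             remaining = parts[1]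
--             continue
--         break
--     return remaining
-- ===== SOURCE B (Python) =====
-- MODIFIERS = {
--     "public", "private", "protected", "internal", "static", "readonly",
--     "volatile", "unsafe", "const", "new", "sealed", "abstract", "extern",
--     "partial", "fixed",
-- }
--
-- def strip_modifiers(declaration: str) -> str:
--     # One pass over the stripped string with an index: advance past each
--     # leading modifier token and the whitespace after it, then slice once.
--     s = declaration.strip()
--     n = len(s)
--     i = 0
--     while True:
--         j = i
--         while j < n and not s[j].isspace():
--             j += 1
--         if j > i and s[i:j] in MODIFIERS:
--             while j < n and s[j].isspace():
--                 j += 1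
--             i = j
--         else:
--             return s[i:]
-- ===== Notes on version B (the rewrite author's own statement) =====
-- stated objective: alternative
-- what changed: A repeatedly calls split(None,1) and rebinds the ever-shorter remainder string; B walks the stripped string once with integer indices (token end, whitespace end) and returns a single final slice.
import Mathlib
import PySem

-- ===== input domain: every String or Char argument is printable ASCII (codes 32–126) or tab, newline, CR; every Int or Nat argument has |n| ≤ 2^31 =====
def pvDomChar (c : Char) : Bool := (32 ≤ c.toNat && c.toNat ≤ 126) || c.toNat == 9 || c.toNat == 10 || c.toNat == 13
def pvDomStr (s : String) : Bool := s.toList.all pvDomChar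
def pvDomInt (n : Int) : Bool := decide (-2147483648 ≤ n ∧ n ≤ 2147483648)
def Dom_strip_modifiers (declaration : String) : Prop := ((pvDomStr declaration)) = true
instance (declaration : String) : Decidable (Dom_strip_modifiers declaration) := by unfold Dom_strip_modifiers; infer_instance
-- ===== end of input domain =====

-- B replaces A's repeated split(None, 1) loop (which re-slices the remainder each
-- round) by a single index-based scan over the stripped string with one final slice;
-- same return value, different traversal (objective: alternative).

-- ===== PORT A =====

-- the module-level MODIFIERS set (a set of distinct string literals)
def pvMODIFIERS : List String :=
  ["public", "private", "protected", "internal", "static", "readonly",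
   "volatile", "unsafe", "const", "new", "sealed", "abstract", "extern",
   "partial", "fixed"]

-- steps of split₀Max.go, needed to justify termination of A's loop
theorem pv_go_nil (fuel m : Nat) (l : List Char) (acc : List (List Char))
    (h : List.dropWhile PySem.Chars.isspace l = []) :
    PySem.Chars.split₀Max.go (fuel + 1) m l acc = acc.reverse := by
  rw [PySem.Chars.split₀Max.go, h]

theorem pv_go_cons (fuel m : Nat) (l : List Char) (acc : List (List Char))
    (d : Char) (ds : List Char)
    (h : List.dropWhile PySem.Chars.isspace l = d :: ds) (hm : m ≠ 0) :
    PySem.Chars.split₀Max.go (fuel + 1) m l acc =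
      PySem.Chars.split₀Max.go fuel (m - 1)
        (List.dropWhile (fun c => !PySem.Chars.isspace c) (d :: ds))
        (List.takeWhile (fun c => !PySem.Chars.isspace c) (d :: ds) :: acc) := by
  rw [PySem.Chars.split₀Max.go, h]
  simp [hm]

theorem pv_go_cons0 (fuel : Nat) (l : List Char) (acc : List (List Char))
    (d : Char) (ds : List Char)
    (h : List.dropWhile PySem.Chars.isspace l = d :: ds) :
    PySem.Chars.split₀Max.go (fuel + 1) 0 l acc = ((d :: ds) :: acc).reverse := by
  rw [PySem.Chars.split₀Max.go, h]
  simp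

-- characterization of s.split(None, 1) (used for termination and the equivalence proof)
theorem pv_split01 (s : List Char) :
    PySem.Chars.split₀Max s 1 =
      (if List.dropWhile PySem.Chars.isspace s = [] then ([] : List (List Char))
       else
         if List.dropWhile PySem.Chars.isspace
              (List.dropWhile (fun c => !PySem.Chars.isspace c)
                (List.dropWhile PySem.Chars.isspace s)) = [] then
           [List.takeWhile (fun c => !PySem.Chars.isspace c)
              (List.dropWhile PySem.Chars.isspace s)]
         else
           [List.takeWhile (fun c => !PySem.Chars.isspace c)
              (List.dropWhile PySem.Chars.isspace s),
            List.dropWhile PySem.Chars.isspace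
              (List.dropWhile (fun c => !PySem.Chars.isspace c)
                (List.dropWhile PySem.Chars.isspace s))]) := by
  have hunf : PySem.Chars.split₀Max s 1
      = PySem.Chars.split₀Max.go (s.length + 1) 1 s [] := by
    simp [PySem.Chars.split₀Max]
  rw [hunf]
  cases hd : List.dropWhile PySem.Chars.isspace s with
  | nil => rw [pv_go_nil _ _ _ _ hd, if_pos rfl]; rfl
  | cons d ds =>
    have hne : s.length = (s.length - 1) + 1 := by
      have hs0 : s ≠ [] := by intro hcon; rw [hcon] at hd; simp at hd
      cases s with
      | nil => exact absurd rfl hs0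
      | cons a as => simp
    rw [pv_go_cons _ _ _ _ _ _ hd (by omega), hne]
    rw [if_neg (by simp)]
    cases hr : List.dropWhile PySem.Chars.isspace
        (List.dropWhile (fun c => !PySem.Chars.isspace c) (d :: ds)) with
    | nil => rw [pv_go_nil _ _ _ _ hr, if_pos rfl]; rfl
    | cons e es => rw [pv_go_cons0 _ _ _ _ _ hr]; rfl

-- termination helper for A's loop: a second piece of split(None, 1) is strictly shorter
theorem pv_split01_dec (s tok r : List Char) (tl : List (List Char))
    (h : PySem.Chars.split₀Max s 1 = tok :: r :: tl) : r.length < s.length := by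
  rw [pv_split01] at h
  split_ifs at h with h1 h2
  · simp at h
  · -- h : [takeWhile …, dropWhile …] = tok :: r :: tl
    simp at h
    obtain ⟨htok, hr, htl⟩ := h
    obtain ⟨d, ds, hdd⟩ : ∃ d ds, List.dropWhile PySem.Chars.isspace s = d :: ds := by
      cases hcase : List.dropWhile PySem.Chars.isspace s with
      | nil => exact absurd hcase h1
      | cons d ds => exact ⟨d, ds, rfl⟩
    have hdfalse : PySem.Chars.isspace d = false := by
      have := List.head_dropWhile_not PySem.Chars.isspace (l := s) (by simp [hdd])
      simp only [hdd, List.head_cons] at this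
      exact this
    have h3 : (List.dropWhile (fun c => !PySem.Chars.isspace c)
        (List.dropWhile PySem.Chars.isspace s)).length ≤ ds.length := by
      rw [hdd, List.dropWhile_cons, if_pos (by simp [hdfalse])]
      exact (List.dropWhile_suffix _).length_le
    have h4 : r.length ≤ (List.dropWhile (fun c => !PySem.Chars.isspace c)
        (List.dropWhile PySem.Chars.isspace s)).length := by
      rw [← hr]; exact (List.dropWhile_suffix _).length_le
    have h5 : (List.dropWhile PySem.Chars.isspace s).length ≤ s.length :=
      (List.dropWhile_suffix _).length_le
    have h6 : (List.dropWhile PySem.Chars.isspace s).length = ds.length + 1 := by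
      rw [hdd]; simp
    omega

-- A's while-True loop over `remaining`
def pvStripLoopA (remaining : List Char) : List Char :=
  match h : PySem.Chars.split₀Max remaining 1 with   -- parts = remaining.split(None, 1)
  | [] => remaining                                   -- parts empty: break, return remaining
  | tok :: rest =>
    if pvMODIFIERS.contains (String.ofList tok) then  -- parts[0] in MODIFIERS
      match h2 : rest with
      | [] => []                                      -- len(parts) == 1: return ""
      | r :: _ => pvStripLoopA r                      -- remaining = parts[1]; continue
    else remaining                                    -- break, return remaining
termination_by remaining.length
decreasing_by
  exact pv_split01_dec remaining tok r _ h

def strip_modifiers (declaration : String) : String :=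
  String.ofList (pvStripLoopA (PySem.Str.strip declaration).toList)

-- ===== PORT B =====

-- `while j < n and p(s[j]): j += 1` — advance an index while the predicate holds
def pvAdvance (s : List Char) (p : Char → Bool) (j : Nat) : Nat :=
  if h : j < s.length then
    if p s[j] then pvAdvance s p (j + 1) else j
  else j
termination_by s.length - j

-- bounds on pvAdvance, needed for termination of B's loop
theorem pvAdvance_ge (s : List Char) (p : Char → Bool) (j : Nat) :
    j ≤ pvAdvance s p j := by
  fun_induction pvAdvance s p j with
  | case1 j h hp ih => omega
  | case2 j h hp => omega
  | case3 j h => omega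

theorem pvAdvance_le_length (s : List Char) (p : Char → Bool) (j : Nat)
    (hj : j ≤ s.length) : pvAdvance s p j ≤ s.length := by
  fun_induction pvAdvance s p j with
  | case1 j h hp ih => exact ih (by omega)
  | case2 j h hp => omega
  | case3 j h => omega

-- B's loop: i scans past leading modifier tokens and their trailing whitespace
def pvAltLoop (s : List Char) (i : Nat) : List Char :=
  let j := pvAdvance s (fun c => !PySem.Chars.isspace c) i
  if i < j ∧ pvMODIFIERS.contains
      (String.ofList (PySem.List.slice s (some (i : Int)) (some (j : Int)))) then
    pvAltLoop s (pvAdvance s PySem.Chars.isspace j)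
  else
    PySem.List.slice s (some (i : Int)) none          -- return s[i:]
termination_by s.length - i
decreasing_by
  rename_i h
  have hi : i < s.length := by
    by_contra hc
    have : pvAdvance s (fun c => !PySem.Chars.isspace c) i = i := by
      rw [pvAdvance]; simp [hc]
    omega
  have h1 : pvAdvance s (fun c => !PySem.Chars.isspace c) i ≤ s.length :=
    pvAdvance_le_length s _ i (by omega)
  have h2 := pvAdvance_ge s PySem.Chars.isspace
    (pvAdvance s (fun c => !PySem.Chars.isspace c) i)
  have h3 := pvAdvance_le_length s PySem.Chars.isspace
    (pvAdvance s (fun c => !PySem.Chars.isspace c) i) h1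
  have hij := h.1
  clear h
  omega

def strip_modifiers_alt (declaration : String) : String :=
  String.ofList (pvAltLoop (PySem.Str.strip declaration).toList 0)

-- ===== PRECONDITION & SPEC =====
def Spec_strip_modifiers (declaration : String) (out : String) : Prop := out = strip_modifiers_alt declaration
instance (declaration : String) (out : String) : Decidable (Spec_strip_modifiers declaration out) := by unfold Spec_strip_modifiers; infer_instance

-- ===== CLAIM (what is proved, stated in full; the proofs are below) =====
def Claim_equal_strip_modifiers : Prop := ∀ (declaration : String), Dom_strip_modifiers declaration → Spec_strip_modifiers declaration (strip_modifiers declaration)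

-- ===== LEMMAS AND PROOFS =====

theorem pvAdvance_eq (s : List Char) (p : Char → Bool) (j : Nat) :
    pvAdvance s p j = j + (List.takeWhile p (s.drop j)).length := by
  fun_induction pvAdvance s p j with
  | case1 j h hp ih =>
    rw [List.drop_eq_getElem_cons h, List.takeWhile_cons, if_pos hp]
    simp only [List.length_cons]; omega
  | case2 j h hp =>
    rw [List.drop_eq_getElem_cons h, List.takeWhile_cons, if_neg (by simp [hp])]
    simp
  | case3 j h =>
    rw [List.drop_eq_nil_of_le (by omega)]; simp

theorem pv_dropWhile_idem (p : Char → Bool) (l : List Char) :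
    List.dropWhile p (List.dropWhile p l) = List.dropWhile p l := by
  induction l with
  | nil => simp
  | cons c cs ih =>
    by_cases h : p c <;> simp [h, ih]

theorem pv_take_tw (p : Char → Bool) (l : List Char) :
    l.take (List.takeWhile p l).length = List.takeWhile p l :=
  (List.prefix_iff_eq_take.mp (List.takeWhile_prefix p)).symm

theorem pv_drop_tw (p : Char → Bool) (l : List Char) :
    l.drop (List.takeWhile p l).length = List.dropWhile p l := by
  have h := List.takeWhile_append_dropWhile (p := p) (l := l)
  calc l.drop (List.takeWhile p l).length
      = (List.takeWhile p l ++ List.dropWhile p l).drop (List.takeWhile p l).length := by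
        rw [h]
    _ = List.dropWhile p l := List.drop_left

theorem pvStripLoopA_nil : pvStripLoopA [] = [] := by
  rw [pvStripLoopA]
  split
  · rfl
  · next tok rest heq => rw [pv_split01] at heq; simp at heq

-- head of an lstripped nonempty list is not whitespace
theorem pv_lstripped_head (c : Char) (cs : List Char)
    (hl : List.dropWhile PySem.Chars.isspace (c :: cs) = c :: cs) :
    PySem.Chars.isspace c = false := by
  by_contra h
  have hc : PySem.Chars.isspace c = true := by simpa using h
  rw [List.dropWhile_cons, if_pos hc] at hl
  have := (List.dropWhile_suffix (l := cs) PySem.Chars.isspace).length_le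
  rw [hl] at this; simp at this

-- the key lemma: B's index loop equals A's split loop on any lstripped suffix
theorem pv_key (n : Nat) (t s : List Char) (i : Nat) (hn : t.length ≤ n)
    (ht : s.drop i = t)
    (hl : List.dropWhile PySem.Chars.isspace t = t) :
    pvAltLoop s i = pvStripLoopA t := by
  induction n generalizing t i with
  | zero =>
    -- t = []
    have ht0 : t = [] := by cases t <;> simp_all
    subst ht0
    rw [pvAltLoop, pvStripLoopA_nil]
    rw [pvAdvance_eq, ht]
    simp [PySem.List.slice_from_natCast, ht]
  | succ n ih =>
    cases htc : t with
    | nil =>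
      subst htc
      rw [pvAltLoop, pvStripLoopA_nil]
      rw [pvAdvance_eq, ht]
      simp [PySem.List.slice_from_natCast, ht]
    | cons c cs =>
      rw [← htc]
      have htne : t ≠ [] := by rw [htc]; simp
      have hcfalse : PySem.Chars.isspace c = false := pv_lstripped_head c cs (htc ▸ hl)
      -- the first token of t
      set tok := List.takeWhile (fun x => !PySem.Chars.isspace x) t with htok
      have htokne : tok ≠ [] := by
        rw [htok, htc, List.takeWhile_cons, if_pos (by simp [hcfalse])]; simp
      set dw := List.dropWhile (fun x => !PySem.Chars.isspace x) t with hdw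
      set rest := List.dropWhile PySem.Chars.isspace dw with hrest
      -- B's first advance lands right after tok
      have hj : pvAdvance s (fun x => !PySem.Chars.isspace x) i = i + tok.length := by
        rw [pvAdvance_eq, ht, htok]
      -- and B's slice s[i:j] is exactly tok
      have hslice : PySem.List.slice s (some (i : Int)) (some ((i + tok.length : Nat) : Int))
          = tok := by
        rw [PySem.List.slice_natCast]
        have harith : i + tok.length - i = tok.length := by omega
        rw [harith, ht, htok, pv_take_tw]
      have hsd : s.drop (i + tok.length) = dw := by
        rw [← List.drop_drop, ht, htok, pv_drop_tw, ← hdw]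
      -- B's second advance lands at the start of rest
      have hk : s.drop (pvAdvance s PySem.Chars.isspace (i + tok.length)) = rest := by
        rw [pvAdvance_eq, hsd, ← List.drop_drop, hsd, pv_drop_tw, ← hrest]
      -- unfold B one step
      rw [pvAltLoop]
      simp only [hj, hslice]
      -- unfold A one step
      rw [pvStripLoopA]
      have hsplit := pv_split01 t
      rw [if_neg (by rw [hl]; exact htne), hl, ← htok, ← hdw, ← hrest] at hsplit
      by_cases hmem : pvMODIFIERS.contains (String.ofList tok)
      · -- modifier: both continue with rest
        have hlt : i < i + tok.length := by
          have hpos : 0 < tok.length := List.length_pos_iff.mpr htokne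
          omega
        rw [if_pos ⟨hlt, hmem⟩]
        have hrlen : rest.length ≤ n := by
          have h1 : rest.length ≤ dw.length := by
            rw [hrest]; exact (List.dropWhile_suffix _).length_le
          have h2 : tok.length + dw.length = t.length := by
            rw [htok, hdw, ← List.length_append, List.takeWhile_append_dropWhile]
          have h3 : 0 < tok.length := List.length_pos_iff.mpr htokne
          omega
        have hrec : pvAltLoop s (pvAdvance s PySem.Chars.isspace (i + tok.length))
            = pvStripLoopA rest :=
          ih rest (pvAdvance s PySem.Chars.isspace (i + tok.length)) hrlen hk
            (by rw [hrest]; exact pv_dropWhile_idem _ _)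
        rw [hrec]
        -- A's side: split₀Max t 1 = [tok] or [tok, rest]; either way A continues with rest
        split
        · next heq =>
          rw [hsplit] at heq
          all_goals try split_ifs at heq
          all_goals simp at heq
        · next tok' rest' heq =>
          rw [hsplit] at heq
          by_cases hre : rest = []
          · rw [if_pos hre] at heq
            injection heq with h1 h2
            subst h1; subst h2
            rw [hre, pvStripLoopA_nil, if_pos hmem]
          · rw [if_neg hre] at heq
            injection heq with h1 h2
            subst h1; subst h2
            rw [if_pos hmem]
      · -- not a modifier: both stop and return t
        rw [if_neg (by intro hc; exact hmem hc.2)]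
        rw [PySem.List.slice_from_natCast, ht]
        split
        · next heq =>
          rw [hsplit] at heq
          all_goals try split_ifs at heq
          all_goals simp at heq
        · next tok' rest' heq =>
          rw [hsplit] at heq
          have htok' : tok' = tok := by
            split_ifs at heq <;> (injection heq with h1 h2; exact h1.symm)
          subst htok'
          rw [if_neg hmem]

-- lstrip (strip l) = strip l
theorem pv_lstrip_strip (l : List Char) :
    List.dropWhile PySem.Chars.isspace (PySem.Chars.strip l) = PySem.Chars.strip l := by
  rw [PySem.Chars.strip, PySem.Chars.lstrip, PySem.Chars.rstrip]
  set y := List.dropWhile PySem.Chars.isspace l with hy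
  have hpre : (List.dropWhile PySem.Chars.isspace y.reverse).reverse <+: y := by
    have hsuf : List.dropWhile PySem.Chars.isspace y.reverse <:+ y.reverse :=
      List.dropWhile_suffix _
    have h2 := List.reverse_prefix.mpr hsuf
    rwa [List.reverse_reverse] at h2
  cases hz : (List.dropWhile PySem.Chars.isspace y.reverse).reverse with
  | nil => simp
  | cons d ds =>
    rw [hz] at hpre
    obtain ⟨u, hu⟩ := hpre
    have hyform : y = d :: (ds ++ u) := by rw [← hu]; simp
    have hd : PySem.Chars.isspace d = false := pv_lstripped_head d (ds ++ u)
      (by rw [← hyform, hy]; exact pv_dropWhile_idem _ _)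
    rw [List.dropWhile_cons, if_neg (by simp [hd])]

-- ===== VERDICT (by name: the statement is the Claim_ definition above) =====
theorem strip_modifiers_spec : Claim_equal_strip_modifiers := by
  intro declaration _
  unfold Spec_strip_modifiers strip_modifiers strip_modifiers_alt
  congr 1
  symm
  apply pv_key (PySem.Str.strip declaration).toList.length _ _ 0 le_rfl (by simp)
  rw [PySem.Str.toList_strip]
  exact pv_lstrip_strip _
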